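-- pv_equiv track=rewrite | github.com/Akhil-Kana/CISC-131-Python-and-C-work | CISC 131 py/scrabble.py | characterScore
-- ===== SOURCE A (Python) =====
-- scores = [1, 3, 3, 2, 1, 4, 2, 4, 1, 8, 5, 1, 3, 1, 1, 3, 10, 1, 1, 1, 1, 4, 4, 8, 4, 10]
--
-- def characterScore(char):
--     score = 0
--     for i in range(26):
--         if not char.isalpha():
--             return -1
--         elif ord(char.lower()) == 97+i:
--             score += scores[i]
--     return score
-- ===== SOURCE B (Python) =====
-- scores = [1, 3, 3, 2, 1, 4, 2, 4, 1, 8, 5, 1, 3, 1, 1, 3, 10, 1, 1, 1, 1, 4, 4, 8, 4, 10]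
--
-- def characterScore(char):
--     if not char.isalpha():
--         return -1
--     i = ord(char.lower()) - 97
--     return scores[i] if 0 <= i <= 25 else 0
-- ===== Notes on version B (the rewrite author's own statement) =====
-- stated objective: simpler
-- what changed: Replaced the 26-iteration scan (re-testing isalpha each round) with a single alphabet-offset index into the score table, keeping 0 for alphabetic non-a..z characters.
import Mathlib
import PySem

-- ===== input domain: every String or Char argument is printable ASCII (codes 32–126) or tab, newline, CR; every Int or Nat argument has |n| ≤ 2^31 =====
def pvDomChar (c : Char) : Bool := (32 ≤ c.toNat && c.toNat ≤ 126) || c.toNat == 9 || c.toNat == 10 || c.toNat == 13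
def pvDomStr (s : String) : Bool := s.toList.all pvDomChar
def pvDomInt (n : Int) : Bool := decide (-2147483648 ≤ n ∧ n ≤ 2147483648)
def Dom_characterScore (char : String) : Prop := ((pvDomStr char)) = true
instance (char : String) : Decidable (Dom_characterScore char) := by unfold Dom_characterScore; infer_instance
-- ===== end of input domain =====

-- B replaces A's 26-iteration scan with a single alphabet-offset table index (simpler).

def pvScores : List Int := [1, 3, 3, 2, 1, 4, 2, 4, 1, 8, 5, 1, 3, 1, 1, 3, 10, 1, 1, 1, 1, 4, 4, 8, 4, 10]

-- ord(s): code of the single character; other lengths raise in Python (excluded by Pre_)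
def pvOrd (s : String) : Int :=
  match s.toList with
  | [c] => (c.toNat : Int)
  | _ => 0

-- ===== PORT A =====
def pvLoopA (char : String) : List Int → Int → Int
  | [], score => score
  | i :: rest, score =>
    if ¬ PySem.Str.strIsalpha char then -1
    else if pvOrd (PySem.Str.lower char) = 97 + i then
      pvLoopA char rest (score + (PySem.List.pyGet? pvScores i).getD 0)
    else pvLoopA char rest score

def characterScore (char : String) : Int :=
  pvLoopA char (PySem.List.pyRange 0 26 1) 0

-- ===== PORT B =====
def characterScore_alt (char : String) : Int :=
  if ¬ PySem.Str.strIsalpha char then -1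
  else
    let i := pvOrd (PySem.Str.lower char) - 97
    if 0 ≤ i ∧ i ≤ 25 then (PySem.List.pyGet? pvScores i).getD 0 else 0

-- ===== PRECONDITION & SPEC =====
-- Pre_ excludes alphabetic strings of length ≠ 1, on which Python's ord raises TypeError in both A and B.
def Pre_characterScore (char : String) : Prop :=
  PySem.Str.strIsalpha char = true → char.toList.length = 1
instance (char : String) : Decidable (Pre_characterScore char) := by unfold Pre_characterScore; infer_instance
def pvWitness_characterScore : String := ("q")

def Spec_characterScore (char : String) (out : Int) : Prop := out = characterScore_alt char
instance (char : String) (out : Int) : Decidable (Spec_characterScore char out) := by unfold Spec_characterScore; infer_instance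

-- ===== CLAIM (what is proved, stated in full; the proofs are below) =====
def Claim_equal_characterScore : Prop := ∀ (char : String), Dom_characterScore char → Pre_characterScore char → Spec_characterScore char (characterScore char)

-- ===== LEMMAS AND PROOFS =====
theorem pvRange26 : PySem.List.pyRange 0 26 1 = [0,1,2,3,4,5,6,7,8,9,10,11,12,13,14,15,16,17,18,19,20,21,22,23,24,25] := by decide

theorem pvCharOfNat_toNat (n : Nat) (h : n < 55296) : (Char.ofNat n).toNat = n := by
  have hv : n.isValidChar := Or.inl h
  simp only [Char.ofNat, hv, dif_pos, Char.ofNatAux, Char.toNat]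
  simp

theorem loopA_alpha (char : String) (h : PySem.Chars.strIsalpha char.toList = true)
    (m : Int) (hm : pvOrd (PySem.Str.lower char) = m) (h1 : 97 ≤ m) (h2 : m ≤ 122) :
    pvLoopA char (PySem.List.pyRange 0 26 1) 0 = (PySem.List.pyGet? pvScores (m - 97)).getD 0 := by
  rw [pvRange26]
  interval_cases m <;>
    simp [pvLoopA, PySem.Str.strIsalpha_eq, h, hm, pvScores, PySem.List.pyGet?, PySem.List.pyIdx?]

theorem characterScore_spec_aux (char : String) (hd : Dom_characterScore char)
    (hp : Pre_characterScore char) : characterScore char = characterScore_alt char := by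
  by_cases h : PySem.Str.strIsalpha char = true
  · -- single character, ASCII letter
    have h' : PySem.Chars.strIsalpha char.toList = true := by
      rw [← PySem.Str.strIsalpha_eq]; exact h
    have hlen := hp h
    obtain ⟨c, hc⟩ : ∃ c, char.toList = [c] := by
      cases hli : char.toList with
      | nil => simp [hli] at hlen
      | cons a t =>
        cases t with
        | nil => exact ⟨a, rfl⟩
        | cons b t' => simp [hli] at hlen
    have halpha : PySem.Chars.isalpha c = true := by
      simpa [PySem.Chars.strIsalpha, hc] using h'
    have hlow : (PySem.Str.lower char).toList = [PySem.Chars.lowerChar c] := by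
      simp [PySem.Str.toList_lower, hc, PySem.Chars.lower]
    have hmdef : pvOrd (PySem.Str.lower char) = ((PySem.Chars.lowerChar c).toNat : Int) := by
      simp [pvOrd, hlow]
    have hrange : 97 ≤ (PySem.Chars.lowerChar c).toNat ∧ (PySem.Chars.lowerChar c).toNat ≤ 122 := by
      have hab : PySem.Chars.isupper c = true ∨ PySem.Chars.islower c = true := by
        simpa [PySem.Chars.isalpha] using halpha
      rcases hab with hu | hl
      · have hu' : 65 ≤ c.toNat ∧ c.toNat ≤ 90 := by
          simp only [PySem.Chars.isupper, Bool.and_eq_true, decide_eq_true_eq, Char.le_def] at hu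
          exact ⟨UInt32.le_iff_toNat_le.mp hu.1, UInt32.le_iff_toNat_le.mp hu.2⟩
        have heq : (PySem.Chars.lowerChar c).toNat = c.toNat + 32 := by
          rw [PySem.Chars.lowerChar, if_pos hu]
          exact pvCharOfNat_toNat _ (by omega)
        omega
      · have hl' : 97 ≤ c.toNat ∧ c.toNat ≤ 122 := by
          simp only [PySem.Chars.islower, Bool.and_eq_true, decide_eq_true_eq, Char.le_def] at hl
          exact ⟨UInt32.le_iff_toNat_le.mp hl.1, UInt32.le_iff_toNat_le.mp hl.2⟩
        have hnu : PySem.Chars.isupper c = false := by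
          simp only [PySem.Chars.isupper, Bool.and_eq_false_iff, decide_eq_false_iff_not, Char.le_def,
            UInt32.le_iff_toNat_le]
          right
          have h90 : 'Z'.val.toNat = 90 := rfl
          have hcc : c.val.toNat = c.toNat := rfl
          omega
        have heq : PySem.Chars.lowerChar c = c := by
          rw [PySem.Chars.lowerChar, if_neg (by simp [hnu])]
        rw [heq]; omega
    set m : Int := pvOrd (PySem.Str.lower char) with hms
    have h1 : 97 ≤ m := by rw [hmdef]; exact_mod_cast hrange.1
    have h2 : m ≤ 122 := by rw [hmdef]; exact_mod_cast hrange.2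
    rw [characterScore, loopA_alpha char h' m rfl h1 h2]
    rw [characterScore_alt, if_neg (by simp [h'])]
    rw [← hms, if_pos (by omega : (0:Int) ≤ m - 97 ∧ m - 97 ≤ 25)]
  · -- not alphabetic: both return -1
    have h'' : PySem.Chars.strIsalpha char.toList = false := by
      rw [← PySem.Str.strIsalpha_eq]
      exact Bool.not_eq_true _ ▸ eq_false_of_ne_true h
    rw [characterScore, pvRange26]
    rw [pvLoopA, if_pos (by simp [h''])]
    rw [characterScore_alt, if_pos (by simp [h''])]

-- ===== VERDICT (by name: the statement is the Claim_ definition above) =====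
theorem characterScore_spec : Claim_equal_characterScore := by
  intro char hd hp
  exact characterScore_spec_aux char hd hp
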